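-- pv_equiv track=rewrite | github.com/Pryowin/adventofcode2023 | day05/day05.py | read_other_lines
-- ===== SOURCE A (Python) =====
-- import copy
--
-- def read_other_lines(data):
--
--     map = -1
--     maps = []
--     map_lines=[]
--     map_line=[]
--     for line in data:
--         if line.rstrip() == "":
--             continue
--
--         if line.find("map:")>0:
--             if map >=0:
--                 maps.append(copy.deepcopy(map_lines))
--                 del map_lines[:]
--             map +=1
--             continue
--
--         line_remaining = line
--         while line_remaining.find(" ") >=0 :
--             end = line_remaining.find(" ")
--             str = line_remaining[:end]
--             map_line.append(int(str))
--             line_remaining = line_remaining[end+1:]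
--
--         map_line.append(int(line_remaining))
--
--         map_lines.append(copy.deepcopy(map_line))
--         del map_line[:]
--
--     maps.append(copy.deepcopy(map_lines))
--     return maps
-- ===== SOURCE B (Python) =====
-- def read_other_lines(data):
--     groups = [[]]
--     headers_seen = 0
--     for line in data:
--         if line.rstrip() == "":
--             continue
--         if line.find("map:") > 0:
--             headers_seen += 1
--             if headers_seen > 1:
--                 groups.append([])
--         else:
--             groups[-1].append([int(x) for x in line.split(' ')])
--     return groups
-- ===== Notes on version B (the rewrite author's own statement) =====
-- stated objective: simpler
-- what changed: Replaces A's -1-initialised counter with deepcopy/del buffer juggling and a manual find/slice tokenizer while-loop by a single pass that keeps an open last group (new group at every header after the first) and parses each line with a split(' ') comprehension.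
import Mathlib
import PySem

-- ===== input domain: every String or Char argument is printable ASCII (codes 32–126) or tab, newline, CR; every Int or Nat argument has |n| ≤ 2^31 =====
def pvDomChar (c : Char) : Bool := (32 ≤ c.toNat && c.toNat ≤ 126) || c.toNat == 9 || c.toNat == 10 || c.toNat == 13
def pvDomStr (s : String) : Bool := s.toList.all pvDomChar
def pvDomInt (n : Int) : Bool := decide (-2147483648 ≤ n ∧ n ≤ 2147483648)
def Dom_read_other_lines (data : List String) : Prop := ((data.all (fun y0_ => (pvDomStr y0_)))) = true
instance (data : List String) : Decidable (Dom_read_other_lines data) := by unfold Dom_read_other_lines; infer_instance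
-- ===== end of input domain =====

-- B replaces A's deepcopy/del buffers and manual find/slice tokenizer by an open-last-group
-- single pass with a split(' ') parse; same cost, simpler. (A mutates nothing observable.)


-- ===== PORT A =====
-- A's inner while loop: scan for the next space, parse the piece before it, continue on the rest.
-- Returns (map_line built so far, final line_remaining); int() ported as ofChars? with .getD 0
-- (Pre_ excludes the inputs where Python's int() raises).
def pvWhileA (line_remaining : List Char) (map_line : List Int) : List Int × List Char :=
  if h : 0 ≤ PySem.Chars.find line_remaining [' '] then
    let e := PySem.Chars.find line_remaining [' ']
    pvWhileA (PySem.List.slice line_remaining (some (e + 1)) none)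
      (map_line ++ [(PySem.Int.ofChars? (PySem.List.slice line_remaining none (some e))).getD 0])
  else (map_line, line_remaining)
termination_by line_remaining.length
decreasing_by
  rw [PySem.List.slice_from _ (by omega)]
  rcases (PySem.Chars.find_spec h).1 with ⟨t, ht⟩
  have hlen := congrArg List.length ht
  simp [List.length_drop] at hlen ⊢
  omega

def pvStepA (st : Int × List (List (List Int)) × List (List Int)) (line : String) :
    Int × List (List (List Int)) × List (List Int) :=
  if PySem.Str.rstrip line = "" then st
  else if PySem.Str.find line "map:" > 0 then
    if st.1 ≥ 0 then (st.1 + 1, st.2.1 ++ [st.2.2], [])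
    else (st.1 + 1, st.2.1, st.2.2)
  else
    let r := pvWhileA line.toList []
    (st.1, st.2.1, st.2.2 ++ [r.1 ++ [(PySem.Int.ofChars? r.2).getD 0]])

def read_other_lines (data : List String) : List (List (List Int)) :=
  let st := data.foldl pvStepA (-1, [], [])
  st.2.1 ++ [st.2.2]

-- ===== PORT B =====
-- [int(x) for x in line.split(' ')]
def pvParseB (line : String) : List Int :=
  ((PySem.Str.split? line " ").getD []).map (fun t => (PySem.Int.ofStr? t).getD 0)

def pvStepB (st : List (List (List Int)) × Int) (line : String) : List (List (List Int)) × Int :=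
  if PySem.Str.rstrip line = "" then st
  else if PySem.Str.find line "map:" > 0 then
    if st.2 + 1 > 1 then (st.1 ++ [[]], st.2 + 1) else (st.1, st.2 + 1)
  else (st.1.dropLast ++ [(st.1.getLast?.getD []) ++ [pvParseB line]], st.2)

def read_other_lines_alt (data : List String) : List (List (List Int)) :=
  (data.foldl pvStepB ([[]], 0)).1

-- ===== PRECONDITION & SPEC =====
-- Pre_ excludes exactly the inputs where Python's int() raises ValueError: a non-blank,
-- non-header line containing a token that is not a valid integer literal.
def Pre_read_other_lines (data : List String) : Prop :=
  ∀ line ∈ data, PySem.Str.rstrip line ≠ "" → ¬ (PySem.Str.find line "map:" > 0) →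
    ∀ t ∈ PySem.Chars.splitOn line.toList [' '], (PySem.Int.ofChars? t).isSome = true
instance (data : List String) : Decidable (Pre_read_other_lines data) := by
  unfold Pre_read_other_lines; infer_instance
def pvWitness_read_other_lines : List String := ["79 14", "seed-to-soil map:", "50 98 2"]

def Spec_read_other_lines (data : List String) (out : List (List (List Int))) : Prop := out = read_other_lines_alt data
instance (data : List String) (out : List (List (List Int))) : Decidable (Spec_read_other_lines data out) := by unfold Spec_read_other_lines; infer_instance

-- ===== CLAIM (what is proved, stated in full; the proofs are below) =====
def Claim_equal_read_other_lines : Prop := ∀ (data : List String), Dom_read_other_lines data → Pre_read_other_lines data → Spec_read_other_lines data (read_other_lines data)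

-- ===== LEMMAS AND PROOFS =====

-- one split step of Python's str.split(' '): first token and the remaining tokens
def pvSplit1 : List Char → List Char × List (List Char)
  | [] => ([], [])
  | c :: rest =>
    let r := pvSplit1 rest
    if c = ' ' then ([], r.1 :: r.2) else (c :: r.1, r.2)

lemma pvSplitOn_go_eq (l : List Char) : ∀ (fuel : Nat) (cur : List Char) (acc : List (List Char)),
    l.length < fuel →
    PySem.Chars.splitOn.go [' '] fuel l cur acc =
      acc.reverse ++ ((cur.reverse ++ (pvSplit1 l).1) :: (pvSplit1 l).2) := by
  induction l with
  | nil =>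
    intro fuel cur acc hf
    match fuel, hf with
    | fuel + 1, _ => simp [PySem.Chars.splitOn.go, pvSplit1]
  | cons c rest ih =>
    intro fuel cur acc hf
    match fuel, hf with
    | fuel + 1, hf =>
      by_cases hc : c = ' '
      · subst hc
        rw [show PySem.Chars.splitOn.go [' '] (fuel + 1) (' ' :: rest) cur acc
              = PySem.Chars.splitOn.go [' '] fuel rest [] (cur.reverse :: acc) by
            simp [PySem.Chars.splitOn.go, List.isPrefixOf]]
        rw [ih fuel [] (cur.reverse :: acc) (by simpa using hf)]
        simp [pvSplit1]
      · rw [show PySem.Chars.splitOn.go [' '] (fuel + 1) (c :: rest) cur acc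
              = PySem.Chars.splitOn.go [' '] fuel rest (c :: cur) acc by
            simp [PySem.Chars.splitOn.go, List.isPrefixOf, Ne.symm hc]]
        rw [ih fuel (c :: cur) acc (by simpa using hf)]
        simp [pvSplit1, hc]

lemma pvSplitOn_eq (l : List Char) :
    PySem.Chars.splitOn l [' '] = (pvSplit1 l).1 :: (pvSplit1 l).2 := by
  rw [PySem.Chars.splitOn, pvSplitOn_go_eq l (l.length + 1) [] [] (by omega)]
  simp

lemma pvSplit1_no_space (l : List Char) (h : ' ' ∉ l) : pvSplit1 l = (l, []) := by
  induction l with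
  | nil => rfl
  | cons c rest ih =>
    simp only [List.mem_cons, not_or] at h
    simp [pvSplit1, ih h.2, Ne.symm h.1]

lemma pvSplit1_space (a b : List Char) (h : ' ' ∉ a) :
    pvSplit1 (a ++ ' ' :: b) = (a, (pvSplit1 b).1 :: (pvSplit1 b).2) := by
  induction a with
  | nil => simp [pvSplit1]
  | cons c rest ih =>
    simp only [List.mem_cons, not_or] at h
    simp [pvSplit1, ih h.2, Ne.symm h.1]

def pvPint (t : List Char) : Int := (PySem.Int.ofChars? t).getD 0

-- A's while loop + final append computes int over the split-on-space tokens
lemma pvWhileA_eq (n : Nat) : ∀ (l : List Char), l.length ≤ n → ∀ (ml : List Int),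
    (pvWhileA l ml).1 ++ [pvPint (pvWhileA l ml).2] =
      ml ++ ((pvSplit1 l).1 :: (pvSplit1 l).2).map pvPint := by
  induction n with
  | zero =>
    intro l hl ml
    have : l = [] := by cases l <;> simp_all
    subst this
    have hf : PySem.Chars.find [] [' '] = -1 :=
      (PySem.Chars.find_eq_neg_one_iff _ _).mpr (by simp)
    rw [pvWhileA]
    simp [hf, pvSplit1, pvPint]
  | succ n ih =>
    intro l hl ml
    by_cases h : 0 ≤ PySem.Chars.find l [' ']
    · set e := PySem.Chars.find l [' '] with he
      obtain ⟨hpre, hmin⟩ := PySem.Chars.find_spec (s := l) (sub := [' ']) h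
      rcases hpre with ⟨t, ht⟩
      have hdrop : List.drop e.toNat l = ' ' :: t := by simpa using ht.symm
      have hlt : e.toNat < l.length := by
        have := congrArg List.length hdrop
        simp [List.length_drop] at this
        omega
      have hsplit : l = List.take e.toNat l ++ ' ' :: List.drop (e.toNat + 1) l := by
        conv_lhs => rw [← List.take_append_drop e.toNat l]
        rw [hdrop]
        congr 1
        have : List.drop (e.toNat + 1) l = List.drop 1 (List.drop e.toNat l) := by
          rw [List.drop_drop]
        rw [this, hdrop]
        simp
      have hnos : ' ' ∉ List.take e.toNat l := by
        intro hmem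
        rcases List.getElem_of_mem hmem with ⟨i, hi, hgi⟩
        have hil : i < l.length := by simp at hi; omega
        have hi' : i < e.toNat := by simp at hi; omega
        apply hmin i hi'
        have : List.drop i l = l[i] :: List.drop (i + 1) l := (List.getElem_cons_drop hil).symm
        rw [this]
        have : l[i] = ' ' := by
          rw [← List.getElem_take (h := hi)]  -- l[i] = (take e.toNat l)[i]
          exact hgi
        simp [this]
      rw [pvWhileA]
      simp only [← he, dif_pos h]
      rw [PySem.List.slice_to _ h, PySem.List.slice_from _ (by omega)]
      have htn : (e + 1).toNat = e.toNat + 1 := by omega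
      rw [htn]
      rw [ih (List.drop (e.toNat + 1) l) (by simp [List.length_drop]; omega)]
      have hps := pvSplit1_space (List.take e.toNat l) (List.drop (e.toNat + 1) l) hnos
      rw [← hsplit] at hps
      rw [hps]
      simp [pvPint]
    · rw [pvWhileA]
      simp only [dif_neg h]
      have hnosp : ' ' ∉ l := by
        intro hm
        rcases List.append_of_mem hm with ⟨s, t', rfl⟩
        have : [' '] <:+: s ++ ' ' :: t' := ⟨s, t', by simp⟩
        have := (PySem.Chars.find_nonneg_iff (s ++ ' ' :: t') [' ']).mpr this
        exact h this
      rw [pvSplit1_no_space l hnosp]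
      simp [pvPint]

lemma pvParseB_eq (line : String) :
    pvParseB line = (pvWhileA line.toList []).1 ++ [pvPint (pvWhileA line.toList []).2] := by
  rw [pvWhileA_eq line.toList.length line.toList le_rfl []]
  rw [pvParseB]
  have : PySem.Str.split? line " " =
      some ((PySem.Chars.splitOn line.toList [' ']).map String.ofList) := by
    rw [PySem.Str.split?, PySem.Chars.split?]
    rfl
  rw [this, pvSplitOn_eq]
  simp [pvPint, PySem.Int.ofStr?]

lemma pvFold_eq (data : List String) : ∀ (map : Int) (maps : List (List (List Int)))
    (map_lines : List (List Int)),
    data.foldl pvStepB (maps ++ [map_lines], map + 1) =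
      ((data.foldl pvStepA (map, maps, map_lines)).2.1 ++
        [(data.foldl pvStepA (map, maps, map_lines)).2.2],
       (data.foldl pvStepA (map, maps, map_lines)).1 + 1) := by
  induction data with
  | nil => intro map maps map_lines; rfl
  | cons line rest ih =>
    intro map maps map_lines
    simp only [List.foldl_cons]
    by_cases hb : PySem.Str.rstrip line = ""
    · rw [show pvStepB (maps ++ [map_lines], map + 1) line = (maps ++ [map_lines], map + 1) by
          simp [pvStepB, hb],
        show pvStepA (map, maps, map_lines) line = (map, maps, map_lines) by
          simp [pvStepA, hb]]
      exact ih map maps map_lines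
    · by_cases hh : PySem.Str.find line "map:" > 0
      · by_cases hm : map ≥ 0
        · rw [show pvStepB (maps ++ [map_lines], map + 1) line
                = ((maps ++ [map_lines]) ++ [[]], (map + 1) + 1) by
              unfold pvStepB; rw [if_neg hb, if_pos hh, if_pos (by omega : (map : Int) + 1 + 1 > 1)],
            show pvStepA (map, maps, map_lines) line = (map + 1, maps ++ [map_lines], []) by
              unfold pvStepA; rw [if_neg hb, if_pos hh, if_pos hm]]
          exact ih (map + 1) (maps ++ [map_lines]) []
        · rw [show pvStepB (maps ++ [map_lines], map + 1) line
                = (maps ++ [map_lines], (map + 1) + 1) by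
              unfold pvStepB; rw [if_neg hb, if_pos hh, if_neg (by omega : ¬ ((map : Int) + 1 + 1 > 1))],
            show pvStepA (map, maps, map_lines) line = (map + 1, maps, map_lines) by
              unfold pvStepA; rw [if_neg hb, if_pos hh, if_neg hm]]
          exact ih (map + 1) maps map_lines
      · rw [show pvStepB (maps ++ [map_lines], map + 1) line
              = (maps ++ [map_lines ++ [pvParseB line]], map + 1) by
            unfold pvStepB; rw [if_neg hb, if_neg hh]
            simp,
          show pvStepA (map, maps, map_lines) line
              = (map, maps, map_lines ++ [(pvWhileA line.toList []).1 ++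
                  [(PySem.Int.ofChars? (pvWhileA line.toList []).2).getD 0]]) by
            unfold pvStepA; rw [if_neg hb, if_neg hh]]
        rw [show map_lines ++ [pvParseB line] = map_lines ++ [(pvWhileA line.toList []).1 ++
              [(PySem.Int.ofChars? (pvWhileA line.toList []).2).getD 0]] by
            rw [pvParseB_eq]; rfl]
        exact ih map maps (map_lines ++ [(pvWhileA line.toList []).1 ++
          [(PySem.Int.ofChars? (pvWhileA line.toList []).2).getD 0]])

-- ===== VERDICT (by name: the statement is the Claim_ definition above) =====
theorem read_other_lines_spec : Claim_equal_read_other_lines := by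
  intro data _ _
  show read_other_lines data = read_other_lines_alt data
  rw [read_other_lines, read_other_lines_alt]
  have := pvFold_eq data (-1) [] []
  simp only [show (-1 : Int) + 1 = 0 by omega, List.nil_append] at this
  rw [this]
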